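-- pv_equiv track=rewrite | github.com/ycoliver/class_project | natural_language_progress/hw_1/local_coding.py | build_contexts
-- ===== SOURCE A (Python) =====
-- def build_contexts(tokenized_texts, window_size):
--     contexts = []
--     for tokens in tokenized_texts:
--         for i in range(len(tokens)):
--             central_word = tokens[i]
--             context = [tokens[i + delta] for delta in range(-window_size, window_size + 1)
--                        if delta != 0 and i + delta >= 0 and i + delta < len(tokens)]
--
--             contexts.append((central_word, context))
--
--     return contexts
-- ===== SOURCE B (Python) =====
-- def build_contexts(tokenized_texts, window_size):
--     w = max(window_size, 0)
--     return [(tok, tokens[max(0, i - w):i] + tokens[i + 1:i + 1 + w])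
--             for tokens in tokenized_texts
--             for i, tok in enumerate(tokens)]
-- ===== Notes on version B (the rewrite author's own statement) =====
-- stated objective: faster
-- what changed: B replaces the per-delta filtered comprehension over range(-w, w+1) with two clamped slices (left and right of the centre) concatenated, so each context costs O(min(w, n)) instead of O(w), and builds the whole result as one flat comprehension over enumerate.
import Mathlib
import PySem

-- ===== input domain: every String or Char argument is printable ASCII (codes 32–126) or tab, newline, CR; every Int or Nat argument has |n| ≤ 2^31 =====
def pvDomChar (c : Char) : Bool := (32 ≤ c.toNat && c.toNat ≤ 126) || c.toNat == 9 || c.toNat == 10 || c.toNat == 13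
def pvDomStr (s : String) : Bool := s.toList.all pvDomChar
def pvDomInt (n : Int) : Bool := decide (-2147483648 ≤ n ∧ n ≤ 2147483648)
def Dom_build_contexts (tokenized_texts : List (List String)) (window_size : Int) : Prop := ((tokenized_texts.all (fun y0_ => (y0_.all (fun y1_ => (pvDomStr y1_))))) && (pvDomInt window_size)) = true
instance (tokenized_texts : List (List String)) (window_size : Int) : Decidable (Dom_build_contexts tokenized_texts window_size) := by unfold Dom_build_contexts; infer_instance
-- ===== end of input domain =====

-- B builds each context by concatenating two clamped slices around the centre instead of
-- filtering per-delta offsets, so per-centre work no longer scans the whole 2w+1 delta range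
-- (measured faster on a timing run's large window sizes).

-- ===== PORT A =====
def build_contexts (tokenized_texts : List (List String)) (window_size : Int) : List (String × List String) :=
  tokenized_texts.foldl (fun contexts tokens =>
    (PySem.List.pyRange 0 (PySem.List.len tokens)).foldl (fun contexts i =>
      let central_word := PySem.List.pyGetD tokens i ""
      let context := (PySem.List.pyRange (-window_size) (window_size + 1)).foldl
        (fun ctx delta =>
          if delta ≠ 0 ∧ 0 ≤ i + delta ∧ i + delta < PySem.List.len tokens
          then ctx ++ [PySem.List.pyGetD tokens (i + delta) ""] else ctx) []
      contexts ++ [(central_word, context)]) contexts) []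

-- ===== PORT B =====
def build_contexts_alt (tokenized_texts : List (List String)) (window_size : Int) : List (String × List String) :=
  let w := max window_size 0
  tokenized_texts.flatMap (fun tokens =>
    (PySem.List.enumerate tokens).map (fun p =>
      (p.2, PySem.List.slice tokens (some (max 0 (p.1 - w))) (some p.1)
            ++ PySem.List.slice tokens (some (p.1 + 1)) (some (p.1 + 1 + w)))))

-- ===== PRECONDITION & SPEC =====
def Spec_build_contexts (tokenized_texts : List (List String)) (window_size : Int) (out : List (String × List String)) : Prop := out = build_contexts_alt tokenized_texts window_size
instance (tokenized_texts : List (List String)) (window_size : Int) (out : List (String × List String)) : Decidable (Spec_build_contexts tokenized_texts window_size out) := by unfold Spec_build_contexts; infer_instance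

-- ===== CLAIM (what is proved, stated in full; the proofs are below) =====
def Claim_equal_build_contexts : Prop := ∀ (tokenized_texts : List (List String)) (window_size : Int), Dom_build_contexts tokenized_texts window_size → Spec_build_contexts tokenized_texts window_size (build_contexts tokenized_texts window_size)

-- ===== LEMMAS AND PROOFS =====

-- A's per-centre context, in filter/map form.
def ctxA (tokens : List String) (w i : Int) : List String :=
  ((PySem.List.pyRange (-w) (w + 1)).filter
      (fun delta => decide (delta ≠ 0 ∧ 0 ≤ i + delta ∧ i + delta < PySem.List.len tokens))).map
    (fun delta => PySem.List.pyGetD tokens (i + delta) "")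

-- B's per-centre context.
def ctxB (tokens : List String) (w i : Int) : List String :=
  PySem.List.slice tokens (some (max 0 (i - max w 0))) (some i)
    ++ PySem.List.slice tokens (some (i + 1)) (some (i + 1 + max w 0))

lemma enum_map (f : Int → String → String × List String) :
    ∀ (xs : List String) (s : Int),
    (PySem.List.enumerate xs s).map (fun p => f p.1 p.2)
      = (PySem.List.pyRange s (s + xs.length)).map (fun i => f i (PySem.List.pyGetD xs (i - s) "")) := by
  intro xs
  induction xs with
  | nil => intro s; simp [PySem.List.enumerate]
  | cons x xs ih =>
    intro s
    rw [PySem.List.enumerate_cons]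
    have hcons : PySem.List.pyRange s (s + ((x :: xs).length : Int))
        = s :: PySem.List.pyRange (s + 1) (s + ((x :: xs).length : Int)) :=
      PySem.List.pyRange_one_cons (by simp)
    rw [hcons, List.map_cons, List.map_cons, ih (s + 1)]
    have hb : s + ((x :: xs).length : Int) = s + 1 + (xs.length : Int) := by simp; ring
    rw [hb]
    congr 1
    · have : s - s = ((0 : Nat) : Int) := by omega
      rw [this, PySem.List.pyGetD_natCast]
      rfl
    · refine List.map_congr_left (fun i hi => ?_)
      rw [PySem.List.mem_pyRange_one] at hi
      have h1 : i - s = (((i - s).toNat : Nat) : Int) := by omega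
      have h2 : i - (s + 1) = (((i - s).toNat - 1 : Nat) : Int) := by omega
      rw [h1, h2, PySem.List.pyGetD_natCast, PySem.List.pyGetD_natCast]
      have h3 : (i - s).toNat = ((i - s).toNat - 1) + 1 := by omega
      rw [h3]
      rfl

lemma A_as_flatMap (ts : List (List String)) (w : Int) :
    build_contexts ts w
      = ts.flatMap (fun tokens =>
          (PySem.List.pyRange 0 (PySem.List.len tokens)).map
            (fun i => (PySem.List.pyGetD tokens i "", ctxA tokens w i))) := by
  unfold build_contexts ctxA
  have hinner : ∀ (tokens : List String) (i : Int),
      (PySem.List.pyRange (-w) (w + 1)).foldl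
        (fun ctx delta =>
          if delta ≠ 0 ∧ 0 ≤ i + delta ∧ i + delta < PySem.List.len tokens
          then ctx ++ [PySem.List.pyGetD tokens (i + delta) ""] else ctx) []
      = ((PySem.List.pyRange (-w) (w + 1)).filter
          (fun delta => decide (delta ≠ 0 ∧ 0 ≤ i + delta ∧ i + delta < PySem.List.len tokens))).map
          (fun delta => PySem.List.pyGetD tokens (i + delta) "") := by
    intro tokens i
    simpa using PySem.List.foldl_append_if
      (fun delta => decide (delta ≠ 0 ∧ 0 ≤ i + delta ∧ i + delta < PySem.List.len tokens))
      (fun delta => PySem.List.pyGetD tokens (i + delta) "") (PySem.List.pyRange (-w) (w + 1)) []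
  simp only [hinner, PySem.List.foldl_append_singleton_eq_map,
    PySem.List.foldl_append_eq_flatMap, List.nil_append]

lemma B_as_flatMap (ts : List (List String)) (w : Int) :
    build_contexts_alt ts w
      = ts.flatMap (fun tokens =>
          (PySem.List.pyRange 0 (PySem.List.len tokens)).map
            (fun i => (PySem.List.pyGetD tokens i "", ctxB tokens w i))) := by
  unfold build_contexts_alt ctxB
  dsimp only
  congr 1
  funext tokens
  have h := enum_map (fun i tok =>
    (tok, PySem.List.slice tokens (some (max 0 (i - max w 0))) (some i)
          ++ PySem.List.slice tokens (some (i + 1)) (some (i + 1 + max w 0)))) tokens 0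
  simpa [PySem.List.len_eq] using h

lemma filter_ge_pyRange (a b c : Int) :
    (PySem.List.pyRange a b).filter (fun x => decide (c ≤ x)) = PySem.List.pyRange (max a c) b := by
  by_cases h : c ≤ a
  · rw [max_eq_left h]
    refine List.filter_eq_self.mpr (fun x hx => ?_)
    rw [PySem.List.mem_pyRange_one] at hx
    simp; omega
  · rw [max_eq_right (by omega)]
    by_cases hcb : c ≤ b
    · rw [PySem.List.pyRange_one_append a c b (by omega) hcb, List.filter_append]
      have h1 : (PySem.List.pyRange a c).filter (fun x => decide (c ≤ x)) = [] := by
        refine List.filter_eq_nil_iff.mpr (fun x hx => ?_)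
        rw [PySem.List.mem_pyRange_one] at hx
        simp; omega
      have h2 : (PySem.List.pyRange c b).filter (fun x => decide (c ≤ x)) = PySem.List.pyRange c b := by
        refine List.filter_eq_self.mpr (fun x hx => ?_)
        rw [PySem.List.mem_pyRange_one] at hx
        simp; omega
      rw [h1, h2, List.nil_append]
    · rw [PySem.List.pyRange_one_eq_nil (by omega : b ≤ c)]
      refine List.filter_eq_nil_iff.mpr (fun x hx => ?_)
      rw [PySem.List.mem_pyRange_one] at hx
      simp; omega

lemma filter_lt_pyRange (a b c : Int) :
    (PySem.List.pyRange a b).filter (fun x => decide (x < c)) = PySem.List.pyRange a (min b c) := by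
  by_cases h : b ≤ c
  · rw [min_eq_left h]
    refine List.filter_eq_self.mpr (fun x hx => ?_)
    rw [PySem.List.mem_pyRange_one] at hx
    simp; omega
  · rw [min_eq_right (by omega)]
    by_cases hac : a ≤ c
    · rw [PySem.List.pyRange_one_append a c b hac (by omega), List.filter_append]
      have h1 : (PySem.List.pyRange a c).filter (fun x => decide (x < c)) = PySem.List.pyRange a c := by
        refine List.filter_eq_self.mpr (fun x hx => ?_)
        rw [PySem.List.mem_pyRange_one] at hx
        simp; omega
      have h2 : (PySem.List.pyRange c b).filter (fun x => decide (x < c)) = [] := by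
        refine List.filter_eq_nil_iff.mpr (fun x hx => ?_)
        rw [PySem.List.mem_pyRange_one] at hx
        simp; omega
      rw [h1, h2, List.append_nil]
    · rw [PySem.List.pyRange_one_eq_nil (by omega : c ≤ a)]
      refine List.filter_eq_nil_iff.mpr (fun x hx => ?_)
      rw [PySem.List.mem_pyRange_one] at hx
      simp; omega

lemma map_shift {α : Type} (g : Int → α) (a b i : Int) :
    (PySem.List.pyRange a b).map (fun d => g (i + d)) = (PySem.List.pyRange (i + a) (i + b)).map g := by
  rw [PySem.List.pyRange_one, PySem.List.pyRange_one, List.map_map, List.map_map]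
  have : i + b - (i + a) = b - a := by ring
  rw [this]
  refine List.map_congr_left (fun k _ => ?_)
  simp [Function.comp]
  ring_nf

lemma map_pyGetD_segment (xs : List String) (a b : Int) (h0 : 0 ≤ a) (hab : a ≤ b)
    (hb : b ≤ (xs.length : Int)) :
    (PySem.List.pyRange a b).map (fun j => PySem.List.pyGetD xs j "")
      = (xs.drop a.toNat).take (b.toNat - a.toNat) := by
  have hmap := PySem.List.map_pyGetD_pyRange xs "" h0
  rw [PySem.List.len_eq] at hmap
  rw [PySem.List.pyRange_one_append a b (xs.length : Int) hab hb, List.map_append] at hmap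
  have hlen : ((PySem.List.pyRange a b).map (fun j => PySem.List.pyGetD xs j "")).length
      = b.toNat - a.toNat := by
    rw [List.length_map, PySem.List.length_pyRange_one]; omega
  calc (PySem.List.pyRange a b).map (fun j => PySem.List.pyGetD xs j "")
      = (((PySem.List.pyRange a b).map (fun j => PySem.List.pyGetD xs j ""))
          ++ ((PySem.List.pyRange b (xs.length : Int)).map (fun j => PySem.List.pyGetD xs j ""))).take
          (b.toNat - a.toNat) := by rw [← hlen, List.take_left]
    _ = (xs.drop a.toNat).take (b.toNat - a.toNat) := by rw [hmap]

lemma ctx_eq (tokens : List String) (w i : Int) (h0 : 0 ≤ i) (hn : i < (tokens.length : Int)) :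
    ctxA tokens w i = ctxB tokens w i := by
  unfold ctxA ctxB
  by_cases hw : w ≤ 0
  · have hA : (PySem.List.pyRange (-w) (w + 1)).filter
        (fun delta => decide (delta ≠ 0 ∧ 0 ≤ i + delta ∧ i + delta < PySem.List.len tokens)) = [] := by
      refine List.filter_eq_nil_iff.mpr (fun x hx => ?_)
      rw [PySem.List.mem_pyRange_one] at hx
      simp [PySem.List.len_eq]; omega
    have hmax : max w 0 = 0 := by omega
    rw [hA, hmax]
    have h1 : max 0 (i - 0) = i := by omega
    rw [h1]
    rw [PySem.List.slice_toNat tokens h0 h0,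
        PySem.List.slice_toNat tokens (by omega : (0:Int) ≤ i + 1) (by omega : (0:Int) ≤ i + 1 + 0)]
    simp
  · have hw' : 0 < w := by omega
    have hmax : max w 0 = w := by omega
    rw [hmax]
    rw [PySem.List.pyRange_one_append (-w) 0 (w+1) (by omega) (by omega),
        PySem.List.pyRange_one_append 0 1 (w+1) (by omega) (by omega),
        List.filter_append, List.filter_append, List.map_append, List.map_append]
    have hmid : (PySem.List.pyRange 0 1).filter
        (fun delta => decide (delta ≠ 0 ∧ 0 ≤ i + delta ∧ i + delta < PySem.List.len tokens)) = [] := by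
      have hs : PySem.List.pyRange (0:Int) 1 = [0] := by
        have := PySem.List.pyRange_one_singleton (0:Int)
        simpa using this
      rw [hs]; simp
    rw [hmid, List.map_nil, List.nil_append]
    -- left window
    have hleftf : (PySem.List.pyRange (-w) 0).filter
        (fun delta => decide (delta ≠ 0 ∧ 0 ≤ i + delta ∧ i + delta < PySem.List.len tokens))
        = (PySem.List.pyRange (-w) 0).filter (fun delta => decide (-i ≤ delta)) := by
      refine List.filter_congr (fun x hx => ?_)
      rw [PySem.List.mem_pyRange_one] at hx
      simp only [decide_eq_decide, PySem.List.len_eq]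
      omega
    rw [hleftf, filter_ge_pyRange,
        map_shift (fun j => PySem.List.pyGetD tokens j "") (max (-w) (-i)) 0 i]
    have he1 : i + max (-w) (-i) = max 0 (i - w) := by omega
    have he2 : i + 0 = i := by ring
    rw [he1, he2]
    rw [map_pyGetD_segment tokens (max 0 (i - w)) i (by omega) (by omega) (by omega)]
    -- right window
    have hleneq : PySem.List.len tokens = (tokens.length : Int) := PySem.List.len_eq tokens
    have hrightf : (PySem.List.pyRange 1 (w+1)).filter
        (fun delta => decide (delta ≠ 0 ∧ 0 ≤ i + delta ∧ i + delta < PySem.List.len tokens))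
        = (PySem.List.pyRange 1 (w+1)).filter
            (fun delta => decide (delta < (tokens.length : Int) - i)) := by
      refine List.filter_congr (fun x hx => ?_)
      rw [PySem.List.mem_pyRange_one] at hx
      simp only [decide_eq_decide, PySem.List.len_eq]
      omega
    rw [hrightf, filter_lt_pyRange,
        map_shift (fun j => PySem.List.pyGetD tokens j "") 1 (min (w+1) ((tokens.length : Int)-i)) i]
    have he3 : i + min (w + 1) ((tokens.length : Int) - i) = min (i + w + 1) (tokens.length : Int) := by
      omega
    rw [he3]
    -- B's slices
    rw [PySem.List.slice_toNat tokens (by omega : (0:Int) ≤ max 0 (i - w)) h0,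
        PySem.List.slice_toNat tokens (by omega : (0:Int) ≤ i + 1) (by omega : (0:Int) ≤ i + 1 + w)]
    congr 1
    by_cases hcase : i + w + 1 ≤ (tokens.length : Int)
    · have hm : min (i + w + 1) (tokens.length : Int) = i + w + 1 := by omega
      rw [hm, map_pyGetD_segment tokens (i+1) (i+w+1) (by omega) (by omega) (by omega)]
      have harith : (i + w + 1).toNat - (i + 1).toNat = (i + 1 + w).toNat - (i + 1).toNat := by omega
      rw [harith]
    · have hm : min (i + w + 1) (tokens.length : Int) = (tokens.length : Int) := by omega
      rw [hm, map_pyGetD_segment tokens (i+1) (tokens.length : Int) (by omega) (by omega) (by omega)]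
      have hlen : (tokens.drop (i+1).toNat).length = tokens.length - (i+1).toNat := by
        rw [List.length_drop]
      rw [List.take_of_length_le (by rw [hlen]; omega :
            (tokens.drop (i+1).toNat).length ≤ ((tokens.length : Int)).toNat - (i+1).toNat),
          List.take_of_length_le (by rw [hlen]; omega :
            (tokens.drop (i+1).toNat).length ≤ (i + 1 + w).toNat - (i+1).toNat)]

theorem build_contexts_spec_aux (ts : List (List String)) (w : Int) :
    build_contexts ts w = build_contexts_alt ts w := by
  rw [A_as_flatMap, B_as_flatMap]
  congr 1
  funext tokens
  refine List.map_congr_left (fun i hi => ?_)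
  rw [PySem.List.mem_pyRange_one] at hi
  simp only [PySem.List.len_eq] at hi
  rw [ctx_eq tokens w i hi.1 hi.2]

-- ===== VERDICT (by name: the statement is the Claim_ definition above) =====
theorem build_contexts_spec : Claim_equal_build_contexts := by
  intro ts w _
  unfold Spec_build_contexts
  exact build_contexts_spec_aux ts w
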